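-- pv_equiv track=rewrite | github.com/DataCTE/scalable-comfyui-bot | imageGen2.py | edit_given_nodes_properties
-- ===== SOURCE A (Python) =====
-- def edit_given_nodes_properties(workflow, chosen_nodes, key, value):
--     counter = 0
--     changes_made = False
--     for workflow_key in workflow.keys():
--         if counter in chosen_nodes:
--             workflow[workflow_key]['inputs'][key] = value
--             changes_made = True
--         counter += 1
--
--     if not changes_made:
--         raise ValueError("Cannot find the chosen nodes")
--
--     return workflow
-- ===== SOURCE B (Python) =====
-- def edit_given_nodes_properties(workflow, chosen_nodes, key, value):
--     # Mutates workflow in place (same as the original) and returns it.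
--     keys = list(workflow)
--     targets = [keys[i] for i in chosen_nodes if 0 <= i < len(keys)]
--     if not targets:
--         raise ValueError("Cannot find the chosen nodes")
--     for k in targets:
--         workflow[k]['inputs'][key] = value
--     return workflow
-- ===== Notes on version B (the rewrite author's own statement) =====
-- stated objective: idiomatic
-- what changed: B fetches the key list once and drives the update loop by chosen_nodes (keys[i] for each in-range chosen index), instead of A's scan of every workflow key with a running counter and an 'i in chosen_nodes' membership test per key; both mutate workflow in place and return it.
import Mathlib
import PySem

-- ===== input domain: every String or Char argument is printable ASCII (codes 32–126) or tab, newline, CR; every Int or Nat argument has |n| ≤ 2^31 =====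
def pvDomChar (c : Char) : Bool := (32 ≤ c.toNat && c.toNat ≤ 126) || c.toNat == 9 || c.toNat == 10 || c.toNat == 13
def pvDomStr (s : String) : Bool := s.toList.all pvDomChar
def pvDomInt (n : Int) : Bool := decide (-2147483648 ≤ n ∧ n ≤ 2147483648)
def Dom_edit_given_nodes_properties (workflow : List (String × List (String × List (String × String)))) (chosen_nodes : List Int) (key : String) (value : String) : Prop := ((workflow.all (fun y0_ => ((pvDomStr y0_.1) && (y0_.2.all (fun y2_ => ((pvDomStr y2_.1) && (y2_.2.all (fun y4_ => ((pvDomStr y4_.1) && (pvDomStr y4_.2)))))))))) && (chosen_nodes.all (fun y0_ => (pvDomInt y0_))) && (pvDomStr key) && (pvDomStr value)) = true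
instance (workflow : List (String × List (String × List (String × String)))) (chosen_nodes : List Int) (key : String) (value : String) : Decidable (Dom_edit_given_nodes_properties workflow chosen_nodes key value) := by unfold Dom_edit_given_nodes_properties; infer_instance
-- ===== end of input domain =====

-- B drives the update loop by chosen_nodes (keys fetched once by index) instead of A's
-- scan of every key with a running counter; both Pythons mutate `workflow` in place and
-- return it (the theorems below are about the returned value).

-- Shared model of the Python statement `workflow[k]['inputs'][key] = value`, which both
-- programs contain verbatim (dict assignment: first matching key overwritten in place,
-- a fresh key appended; a missing 'inputs' key is a Python KeyError, excluded by Pre_,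
-- modelled here as a no-op).
def pvDictSet (d : List (String × String)) (k v : String) : List (String × String) :=
  match d with
  | [] => [(k, v)]
  | p :: rest => if p.1 = k then (k, v) :: rest else p :: pvDictSet rest k v

def pvSetInputs (node : List (String × List (String × String))) (k v : String) :
    List (String × List (String × String)) :=
  match node with
  | [] => []   -- 'inputs' absent: Python raises KeyError here (outside Pre_)
  | p :: rest => if p.1 = "inputs" then (p.1, pvDictSet p.2 k v) :: rest
                 else p :: pvSetInputs rest k v

def pvAssign (wf : List (String × List (String × List (String × String)))) (wk k v : String) :
    List (String × List (String × List (String × String))) :=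
  match wf with
  | [] => []   -- unreachable: wk always comes from wf's own keys
  | p :: rest => if p.1 = wk then (p.1, pvSetInputs p.2 k v) :: rest
                 else p :: pvAssign rest wk k v

-- ===== PORT A =====
-- counter scan over workflow.keys(); `changes_made` is carried in the fold state exactly as
-- in the Python; the final `raise ValueError` when it is false is excluded by Pre_.
def edit_given_nodes_properties (workflow : List (String × List (String × List (String × String)))) (chosen_nodes : List Int) (key : String) (value : String) : List (String × List (String × List (String × String))) :=
  let st := (workflow.map Prod.fst).foldl
    (fun (st : List (String × List (String × List (String × String))) × Int × Bool) workflow_key =>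
      if st.2.1 ∈ chosen_nodes then (pvAssign st.1 workflow_key key value, st.2.1 + 1, true)
      else (st.1, st.2.1 + 1, st.2.2))
    (workflow, 0, false)
  st.1

-- ===== PORT B =====
-- keys = list(workflow); targets = [keys[i] for i in chosen_nodes if 0 <= i < len(keys)];
-- empty targets = the ValueError (outside Pre_); then one assignment per target key.
def edit_given_nodes_properties_alt (workflow : List (String × List (String × List (String × String)))) (chosen_nodes : List Int) (key : String) (value : String) : List (String × List (String × List (String × String))) :=
  let keys := workflow.map Prod.fst
  let targets := chosen_nodes.filterMap
    (fun i => if 0 ≤ i ∧ i < (keys.length : Int) then PySem.List.pyGet? keys i else none)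
  targets.foldl (fun wf k => pvAssign wf k key value) workflow

-- ===== PRECONDITION & SPEC =====
-- Pre_ = exactly the inputs where Python A returns: some chosen index is in range (else
-- ValueError) and every in-range chosen index selects a node carrying an 'inputs' key
-- (else KeyError from workflow[k]['inputs']).
def Pre_edit_given_nodes_properties (workflow : List (String × List (String × List (String × String)))) (chosen_nodes : List Int) (key : String) (value : String) : Prop :=
  (∃ i ∈ chosen_nodes, 0 ≤ i ∧ i < (workflow.length : Int)) ∧
  (∀ i ∈ chosen_nodes, 0 ≤ i → i < (workflow.length : Int) →
    (((workflow.lookup ((workflow.map Prod.fst).getD i.toNat "")).getD []).map Prod.fst).contains "inputs" = true)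
instance (workflow : List (String × List (String × List (String × String)))) (chosen_nodes : List Int) (key : String) (value : String) : Decidable (Pre_edit_given_nodes_properties workflow chosen_nodes key value) := by unfold Pre_edit_given_nodes_properties; infer_instance

def pvWitness_edit_given_nodes_properties : (List (String × List (String × List (String × String)))) × List Int × String × String :=
  ([("3", [("inputs", [("seed", "1")])]), ("4", [("inputs", [])])], [1], "seed", "42")

def Spec_edit_given_nodes_properties (workflow : List (String × List (String × List (String × String)))) (chosen_nodes : List Int) (key : String) (value : String) (out : List (String × List (String × List (String × String)))) : Prop := out = edit_given_nodes_properties_alt workflow chosen_nodes key value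
instance (workflow : List (String × List (String × List (String × String)))) (chosen_nodes : List Int) (key : String) (value : String) (out : List (String × List (String × List (String × String)))) : Decidable (Spec_edit_given_nodes_properties workflow chosen_nodes key value out) := by unfold Spec_edit_given_nodes_properties; infer_instance

-- ===== CLAIM (what is proved, stated in full; the proofs are below) =====
def Claim_equal_edit_given_nodes_properties : Prop := ∀ (workflow : List (String × List (String × List (String × String)))) (chosen_nodes : List Int) (key : String) (value : String), Dom_edit_given_nodes_properties workflow chosen_nodes key value → Pre_edit_given_nodes_properties workflow chosen_nodes key value → Spec_edit_given_nodes_properties workflow chosen_nodes key value (edit_given_nodes_properties workflow chosen_nodes key value)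

-- ===== LEMMAS AND PROOFS =====

-- assignments with the same key/value are idempotent …
theorem pvDictSet_idem (d : List (String × String)) (k v : String) :
    pvDictSet (pvDictSet d k v) k v = pvDictSet d k v := by
  induction d with
  | nil => simp [pvDictSet]
  | cons p rest ih =>
    by_cases h : p.1 = k
    · simp [pvDictSet, h]
    · simp [pvDictSet, h, ih]

theorem pvSetInputs_idem (node : List (String × List (String × String))) (k v : String) :
    pvSetInputs (pvSetInputs node k v) k v = pvSetInputs node k v := by
  induction node with
  | nil => simp [pvSetInputs]
  | cons p rest ih =>
    by_cases h : p.1 = "inputs"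
    · simp [pvSetInputs, h, pvDictSet_idem]
    · simp [pvSetInputs, h, ih]

theorem pvAssign_idem (wf : List (String × List (String × List (String × String)))) (wk k v : String) :
    pvAssign (pvAssign wf wk k v) wk k v = pvAssign wf wk k v := by
  induction wf with
  | nil => simp [pvAssign]
  | cons p rest ih =>
    by_cases h : p.1 = wk
    · simp [pvAssign, h, pvSetInputs_idem]
    · simp [pvAssign, h, ih]

-- … and assignments to two keys commute
theorem pvAssign_comm (wf : List (String × List (String × List (String × String)))) (a b k v : String) :
    pvAssign (pvAssign wf a k v) b k v = pvAssign (pvAssign wf b k v) a k v := by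
  by_cases hab : a = b
  · subst hab; rfl
  · induction wf with
    | nil => simp [pvAssign]
    | cons p rest ih =>
      by_cases ha : p.1 = a
      · have hb : ¬ p.1 = b := by rw [ha]; exact hab
        simp [pvAssign, ha, hab]
      · by_cases hb : p.1 = b
        · have hba : ¬ b = a := fun h => hab h.symm
          simp [pvAssign, hb, hba]
        · simp [pvAssign, ha, hb, ih]

-- folding pvAssign over a list of keys only depends on the set of keys
theorem foldl_assign_absorb (L : List String) (k v : String)
    (wf : List (String × List (String × List (String × String)))) (x : String) (hx : x ∈ L) :
    L.foldl (fun w t => pvAssign w t k v) (pvAssign wf x k v)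
      = L.foldl (fun w t => pvAssign w t k v) wf := by
  induction L generalizing wf with
  | nil => cases hx
  | cons y L ih =>
    rcases List.mem_cons.mp hx with h | h
    · subst h; simp only [List.foldl_cons, pvAssign_idem]
    · rw [List.foldl_cons, List.foldl_cons]
      show List.foldl _ (pvAssign (pvAssign wf x k v) y k v) L = _
      rw [pvAssign_comm]
      exact ih _ h

theorem foldl_assign_dedup (L : List String) (k v : String)
    (wf : List (String × List (String × List (String × String)))) :
    L.foldl (fun w t => pvAssign w t k v) wf = L.dedup.foldl (fun w t => pvAssign w t k v) wf := by
  induction L generalizing wf with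
  | nil => rfl
  | cons y L ih =>
    by_cases h : y ∈ L
    · rw [List.dedup_cons_of_mem h, List.foldl_cons, foldl_assign_absorb L k v wf y h, ih]
    · rw [List.dedup_cons_of_notMem h, List.foldl_cons, List.foldl_cons, ih]

theorem foldl_assign_mem_congr (L₁ L₂ : List String) (k v : String)
    (h : ∀ x, x ∈ L₁ ↔ x ∈ L₂)
    (wf : List (String × List (String × List (String × String)))) :
    L₁.foldl (fun w t => pvAssign w t k v) wf = L₂.foldl (fun w t => pvAssign w t k v) wf := by
  rw [foldl_assign_dedup, foldl_assign_dedup L₂]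
  have hp : L₁.dedup.Perm L₂.dedup :=
    (List.perm_ext_iff_of_nodup L₁.nodup_dedup L₂.nodup_dedup).mpr (by
      intro a; simp only [List.mem_dedup]; exact h a)
  exact hp.foldl_eq' (fun x _ y _ z => pvAssign_comm z x y k v) wf

-- the key sequence A's counter scan assigns to
def pvSelA (chosen : List Int) : Int → List String → List String
  | _, [] => []
  | c, x :: ks => (if c ∈ chosen then [x] else []) ++ pvSelA chosen (c + 1) ks

theorem selA_mem (chosen : List Int) (c : Int) (ks : List String) (x : String) :
    x ∈ pvSelA chosen c ks ↔ ∃ j : Nat, ks[j]? = some x ∧ (c + (j : Int)) ∈ chosen := by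
  induction ks generalizing c with
  | nil => simp [pvSelA]
  | cons y ks ih =>
    simp only [pvSelA, List.mem_append, ih]
    constructor
    · rintro (hy | ⟨j, hj, hc⟩)
      · have h1 : c ∈ chosen ∧ x = y := by
          by_cases h : c ∈ chosen
          · simp [h] at hy; exact ⟨h, hy⟩
          · simp [h] at hy
        exact ⟨0, by simp [h1.2], by simpa using h1.1⟩
      · refine ⟨j + 1, by simpa using hj, ?_⟩
        push_cast
        rw [show c + ((j : Int) + 1) = c + 1 + (j : Int) from by ring]
        exact hc
    · rintro ⟨j, hj, hc⟩
      cases j with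
      | zero =>
        left
        have hy : y = x := by simpa using hj
        have hc' : c ∈ chosen := by simpa using hc
        simp [hc', hy]
      | succ j =>
        right
        refine ⟨j, by simpa using hj, ?_⟩
        push_cast at hc
        rw [show c + ((j : Int) + 1) = c + 1 + (j : Int) from by ring] at hc
        exact hc

theorem foldA_eq (chosen : List Int) (k v : String) (ks : List String) :
    ∀ (wf : List (String × List (String × List (String × String)))) (c : Int) (b : Bool),
    (ks.foldl
      (fun (st : List (String × List (String × List (String × String))) × Int × Bool) wk =>
        if st.2.1 ∈ chosen then (pvAssign st.1 wk k v, st.2.1 + 1, true)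
        else (st.1, st.2.1 + 1, st.2.2))
      (wf, c, b)).1
      = (pvSelA chosen c ks).foldl (fun w t => pvAssign w t k v) wf := by
  induction ks with
  | nil => intro wf c b; rfl
  | cons y ks ih =>
    intro wf c b
    by_cases h : c ∈ chosen
    · simp [pvSelA, h, ih]
    · simp [pvSelA, h, ih]

theorem targets_mem (chosen : List Int) (ks : List String) (x : String) :
    (x ∈ chosen.filterMap
        (fun i => if 0 ≤ i ∧ i < (ks.length : Int) then PySem.List.pyGet? ks i else none))
      ↔ ∃ j : Nat, ks[j]? = some x ∧ ((j : Int)) ∈ chosen := by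
  simp only [List.mem_filterMap]
  constructor
  · rintro ⟨i, hi, hx⟩
    by_cases h : 0 ≤ i ∧ i < (ks.length : Int)
    · rw [if_pos h, PySem.List.pyGet?_of_nonneg ks h.1] at hx
      exact ⟨i.toNat, hx, by rwa [Int.toNat_of_nonneg h.1]⟩
    · rw [if_neg h] at hx; cases hx
  · rintro ⟨j, hj, hc⟩
    have hlt : j < ks.length := (List.getElem?_eq_some_iff.mp hj).1
    refine ⟨(j : Int), hc, ?_⟩
    rw [if_pos ⟨Int.natCast_nonneg j, by exact_mod_cast hlt⟩]
    simpa using hj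

-- ===== VERDICT (by name: the statement is the Claim_ definition above) =====
theorem edit_given_nodes_properties_spec : Claim_equal_edit_given_nodes_properties := by
  intro workflow chosen_nodes key value _hDom _hPre
  unfold Spec_edit_given_nodes_properties
  unfold edit_given_nodes_properties edit_given_nodes_properties_alt
  rw [foldA_eq]
  apply foldl_assign_mem_congr
  intro x
  rw [selA_mem, targets_mem]
  constructor
  · rintro ⟨j, hj, hc⟩; exact ⟨j, hj, by simpa using hc⟩
  · rintro ⟨j, hj, hc⟩; exact ⟨j, hj, by simpa using hc⟩
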